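-- pv_equiv track=rewrite | github.com/MrBrantCode/unitest_baseline | mut_generate/mist_train_cf/cf_72893/solution.py | prime_composite_numbers
-- ===== SOURCE A (Python) =====
-- def prime_composite_numbers(arr):
--     def is_prime(num):
--         if num < 2:
--             return False
--         for i in range(2, int(num**0.5) + 1):
--             if num % i == 0:
--                 return False
--         return True
--
--     def is_composite(num):
--         if num < 4:
--             return False
--         for i in range(2, int(num ** 0.5) + 1):
--             if num % i == 0:
--                 return True
--         return False
--
--     min_positive_prime = None
--     max_negative_prime = None
--     min_positive_composite = None
--     max_negative_composite = None
--
--     for value in arr: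
--         if value > 0 and is_prime(value):
--             if min_positive_prime is None:
--                 min_positive_prime = value
--             elif value < min_positive_prime:
--                 min_positive_prime = value
--
--         elif value < 0 and is_prime(abs(value)):
--             if max_negative_prime is None:
--                 max_negative_prime = value
--             elif value > max_negative_prime:
--                 max_negative_prime = value
--
--         elif value > 0 and is_composite(value):
--             if min_positive_composite is None:
--                 min_positive_composite = value
--             elif value < min_positive_composite:
--                 min_positive_composite = value
--
--         elif value < 0 and is_composite(abs(value)):
--             if max_negative_composite is None:
--                 max_negative_composite = value
--             elif value > max_negative_composite:
--                 max_negative_composite = value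
--
--     return min_positive_prime, max_negative_prime, min_positive_composite, max_negative_composite
-- ===== SOURCE B (Python) =====
-- def prime_composite_numbers(arr):
--     def is_prime(num):
--         if num < 2:
--             return False
--         for i in range(2, int(num**0.5) + 1):
--             if num % i == 0:
--                 return False
--         return True
--
--     def is_composite(num):
--         if num < 4:
--             return False
--         for i in range(2, int(num ** 0.5) + 1):
--             if num % i == 0:
--                 return True
--         return False
--
--     pos_primes = [v for v in arr if v > 0 and is_prime(v)]
--     neg_primes = [v for v in arr if v < 0 and is_prime(abs(v))]
--     pos_composites = [v for v in arr if v > 0 and is_composite(v)]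
--     neg_composites = [v for v in arr if v < 0 and is_composite(abs(v))]
--
--     return (min(pos_primes) if pos_primes else None,
--             max(neg_primes) if neg_primes else None,
--             min(pos_composites) if pos_composites else None,
--             max(neg_composites) if neg_composites else None)
-- ===== Notes on version B (the rewrite author's own statement) =====
-- stated objective: simpler
-- what changed: Replaces the single loop threading four running min/max Option accumulators through an if/elif chain by four independent filter comprehensions reduced with min()/max() (the buckets are disjoint, so the elif priority is irrelevant).
import Mathlib
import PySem

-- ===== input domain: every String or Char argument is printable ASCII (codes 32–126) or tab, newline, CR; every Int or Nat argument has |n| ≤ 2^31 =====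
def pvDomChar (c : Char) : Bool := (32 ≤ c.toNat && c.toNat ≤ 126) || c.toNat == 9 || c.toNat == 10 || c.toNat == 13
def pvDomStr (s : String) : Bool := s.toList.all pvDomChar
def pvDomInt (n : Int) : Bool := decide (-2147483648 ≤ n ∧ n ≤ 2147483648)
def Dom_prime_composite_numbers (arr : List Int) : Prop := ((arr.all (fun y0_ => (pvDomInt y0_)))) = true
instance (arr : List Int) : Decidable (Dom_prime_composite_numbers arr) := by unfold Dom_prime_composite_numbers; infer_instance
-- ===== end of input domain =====

-- B replaces A's single loop threading four running min/max accumulators through an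
-- if/elif chain by four independent filters reduced with min/max (simpler decomposition).

-- ===== PORT A =====
-- shared trial-division loop of is_prime / is_composite (identical in both Pythons);
-- int(num**0.5) is ported as Nat.sqrt, exact for 0 ≤ num ≤ 2^31 where the loop is reached
def pvHasDiv (num : Int) : Bool :=
  (PySem.List.pyRange 2 ((Nat.sqrt num.toNat : Int) + 1) 1).any
    (fun i => PySem.Int.mod num i == 0)

def pvIsPrime (num : Int) : Bool := if num < 2 then false else !(pvHasDiv num)

def pvIsComposite (num : Int) : Bool := if num < 4 then false else pvHasDiv num

-- the four branch conditions of A's if/elif chain (also B's filter predicates)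
def pvP1 (v : Int) : Bool := decide (0 < v) && pvIsPrime v
def pvP2 (v : Int) : Bool := decide (v < 0) && pvIsPrime |v|
def pvP3 (v : Int) : Bool := decide (0 < v) && pvIsComposite v
def pvP4 (v : Int) : Bool := decide (v < 0) && pvIsComposite |v|

def pvUpdMin (o : Option Int) (v : Int) : Option Int :=
  match o with
  | none => some v
  | some m => if v < m then some v else some m

def pvUpdMax (o : Option Int) (v : Int) : Option Int :=
  match o with
  | none => some v
  | some m => if m < v then some v else some m

def pvStep (st : Option Int × Option Int × Option Int × Option Int) (v : Int) :
    Option Int × Option Int × Option Int × Option Int :=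
  if pvP1 v then (pvUpdMin st.1 v, st.2.1, st.2.2.1, st.2.2.2)
  else if pvP2 v then (st.1, pvUpdMax st.2.1 v, st.2.2.1, st.2.2.2)
  else if pvP3 v then (st.1, st.2.1, pvUpdMin st.2.2.1 v, st.2.2.2)
  else if pvP4 v then (st.1, st.2.1, st.2.2.1, pvUpdMax st.2.2.2 v)
  else st

def prime_composite_numbers (arr : List Int) : Option Int × Option Int × Option Int × Option Int :=
  arr.foldl pvStep (none, none, none, none)

-- ===== PORT B =====
def prime_composite_numbers_alt (arr : List Int) : Option Int × Option Int × Option Int × Option Int :=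
  (PySem.List.min? (arr.filter pvP1) (fun y => y),
   PySem.List.max? (arr.filter pvP2) (fun y => y),
   PySem.List.min? (arr.filter pvP3) (fun y => y),
   PySem.List.max? (arr.filter pvP4) (fun y => y))

-- ===== PRECONDITION & SPEC =====
def Spec_prime_composite_numbers (arr : List Int) (out : Option Int × Option Int × Option Int × Option Int) : Prop := out = prime_composite_numbers_alt arr
instance (arr : List Int) (out : Option Int × Option Int × Option Int × Option Int) : Decidable (Spec_prime_composite_numbers arr out) := by unfold Spec_prime_composite_numbers; infer_instance

-- ===== CLAIM (what is proved, stated in full; the proofs are below) =====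
def Claim_equal_prime_composite_numbers : Prop := ∀ (arr : List Int), Dom_prime_composite_numbers arr → Spec_prime_composite_numbers arr (prime_composite_numbers arr)

-- ===== LEMMAS AND PROOFS =====

-- a value cannot satisfy both the prime and the composite test
theorem pv_prime_not_comp (n : Int) (h : pvIsPrime n = true) : pvIsComposite n = false := by
  unfold pvIsPrime at h
  unfold pvIsComposite
  by_cases h4 : n < 4
  · simp [h4]
  · have h2 : ¬ n < 2 := by omega
    simp [h2] at h
    simp [h4, h]

theorem pvP1_P3 (v : Int) (h : pvP1 v = true) : pvP3 v = false := by
  unfold pvP1 at h; unfold pvP3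
  simp only [Bool.and_eq_true] at h
  simp [pv_prime_not_comp v h.2]

theorem pvP3_P1 (v : Int) (h : pvP3 v = true) : pvP1 v = false := by
  unfold pvP3 at h; unfold pvP1
  simp only [Bool.and_eq_true] at h
  by_cases hp : pvIsPrime v = true
  · have := pv_prime_not_comp v hp; rw [this] at h; simp at h
  · simp [Bool.eq_false_iff.mpr hp]

theorem pvP2_P4 (v : Int) (h : pvP2 v = true) : pvP4 v = false := by
  unfold pvP2 at h; unfold pvP4
  simp only [Bool.and_eq_true] at h
  simp [pv_prime_not_comp _ h.2]

theorem pvP4_P2 (v : Int) (h : pvP4 v = true) : pvP2 v = false := by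
  unfold pvP4 at h; unfold pvP2
  simp only [Bool.and_eq_true] at h
  by_cases hp : pvIsPrime |v| = true
  · have := pv_prime_not_comp _ hp; rw [this] at h; simp at h
  · simp [Bool.eq_false_iff.mpr hp]

theorem pv_sign12 (v : Int) (h : pvP1 v = true) : pvP2 v = false ∧ pvP4 v = false := by
  unfold pvP1 at h; unfold pvP2 pvP4
  simp only [Bool.and_eq_true, decide_eq_true_eq] at h
  constructor <;> simp <;> omega

theorem pv_sign21 (v : Int) (h : pvP2 v = true) : pvP1 v = false ∧ pvP3 v = false := by
  unfold pvP2 at h; unfold pvP1 pvP3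
  simp only [Bool.and_eq_true, decide_eq_true_eq] at h
  constructor <;> simp <;> omega

theorem pv_sign32 (v : Int) (h : pvP3 v = true) : pvP2 v = false ∧ pvP4 v = false := by
  unfold pvP3 at h; unfold pvP2 pvP4
  simp only [Bool.and_eq_true, decide_eq_true_eq] at h
  constructor <;> simp <;> omega

theorem pv_sign41 (v : Int) (h : pvP4 v = true) : pvP1 v = false ∧ pvP3 v = false := by
  unfold pvP4 at h; unfold pvP1 pvP3
  simp only [Bool.and_eq_true, decide_eq_true_eq] at h
  constructor <;> simp <;> omega

-- A's fold splits componentwise into folds over the four (disjoint) filtered lists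
theorem pv_fold_split (arr : List Int) (a b c d : Option Int) :
    arr.foldl pvStep (a, b, c, d) =
      (List.foldl pvUpdMin a (arr.filter pvP1),
       List.foldl pvUpdMax b (arr.filter pvP2),
       List.foldl pvUpdMin c (arr.filter pvP3),
       List.foldl pvUpdMax d (arr.filter pvP4)) := by
  induction arr generalizing a b c d with
  | nil => rfl
  | cons v t ih =>
    simp only [List.foldl_cons, List.filter_cons]
    by_cases h1 : pvP1 v = true
    · obtain ⟨h2, h4⟩ := pv_sign12 v h1
      have h3 := pvP1_P3 v h1
      simp [pvStep, h1, h2, h3, h4, ih]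
    · by_cases h2 : pvP2 v = true
      · obtain ⟨h1', h3⟩ := pv_sign21 v h2
        have h4 := pvP2_P4 v h2
        simp [pvStep, h1', h2, h3, h4, ih]
      · by_cases h3 : pvP3 v = true
        · obtain ⟨h2', h4⟩ := pv_sign32 v h3
          have h1' := pvP3_P1 v h3
          simp [pvStep, h1', h2', h3, h4, ih]
        · by_cases h4 : pvP4 v = true
          · obtain ⟨h1', h3'⟩ := pv_sign41 v h4
            have h2' := pvP4_P2 v h4
            simp [pvStep, h1', h2', h3', h4, ih]
          · simp [pvStep, Bool.eq_false_iff.mpr h1, Bool.eq_false_iff.mpr h2,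
                  Bool.eq_false_iff.mpr h3, Bool.eq_false_iff.mpr h4, ih]

theorem pvUpdMin_eq (m v : Int) : pvUpdMin (some m) v = some (min m v) := by
  by_cases h : v < m
  · simp [pvUpdMin, h, min_eq_right h.le]
  · simp [pvUpdMin, h, min_eq_left (by omega : m ≤ v)]

theorem pvUpdMax_eq (m v : Int) : pvUpdMax (some m) v = some (max m v) := by
  by_cases h : m < v
  · simp [pvUpdMax, h, max_eq_right h.le]
  · simp [pvUpdMax, h, max_eq_left (by omega : v ≤ m)]

theorem pv_foldMin_some (l : List Int) (m : Int) :
    List.foldl pvUpdMin (some m) l = some (l.foldl min m) := by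
  induction l generalizing m with
  | nil => rfl
  | cons x t ih => simp [pvUpdMin_eq, ih]

theorem pv_foldMax_some (l : List Int) (m : Int) :
    List.foldl pvUpdMax (some m) l = some (l.foldl max m) := by
  induction l generalizing m with
  | nil => rfl
  | cons x t ih => simp [pvUpdMax_eq, ih]

theorem pv_foldMin_min? (l : List Int) :
    List.foldl pvUpdMin none l = PySem.List.min? l (fun y => y) := by
  cases l with
  | nil => rfl
  | cons x t => simp [pvUpdMin, pv_foldMin_some, PySem.List.min?_id_cons]

theorem pv_foldMax_max? (l : List Int) :
    List.foldl pvUpdMax none l = PySem.List.max? l (fun y => y) := by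
  cases l with
  | nil => rfl
  | cons x t => simp [pvUpdMax, pv_foldMax_some, PySem.List.max?_id_cons]

-- ===== VERDICT (by name: the statement is the Claim_ definition above) =====
theorem prime_composite_numbers_spec : Claim_equal_prime_composite_numbers := by
  intro arr _
  unfold Spec_prime_composite_numbers prime_composite_numbers prime_composite_numbers_alt
  rw [pv_fold_split, pv_foldMin_min?, pv_foldMax_max?, pv_foldMin_min?, pv_foldMax_max?]
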